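-- pv_equiv track=rewrite | github.com/benjaminbolling/RSW | src/IO.py | freeDaysClusterCheck
-- ===== SOURCE A (Python) =====
-- def freeDaysClusterCheck(appendflag,item1): # An additional constraint that might need to be fulfilled
--     freeDays = 0
--     item2 = [] # have to check a week back so when last week goes over to next week, rule is also obeyed.
--     for m in range(len(item1)-7,len(item1)):
--         item2.append(item1[m])
--     for m in range(len(item1)):
--         item2.append(item1[m])
--     minzero = 0
--     for item in item2:
--         if item == "0":
--             if minzero == 0:
--                 minzero = 1
--             else:
--                 minzero += 1
--         elif item == "1":
--             if minzero == 1: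
--                 appendflag = False
--             else:
--                 minzero = 0
--     return appendflag
-- ===== SOURCE B (Python) =====
-- def freeDaysClusterCheck(appendflag, item1):
--     # wrap a week back: same index-based reads as the original (negative wraparound kept)
--     days = [item1[m] for m in range(len(item1) - 7, len(item1))] \
--          + [item1[m] for m in range(len(item1))]
--     # only "0"/"1" entries matter; everything else is transparent
--     bits = [d for d in days if d in ("0", "1")]
--     # an isolated free day: a "0" not preceded by another "0" and followed by "1"
--     if any(a != "0" and b == "0" and c == "1"
--            for a, b, c in zip(["x"] + bits, bits, bits[1:])):
--         return False
--     return appendflag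
-- ===== Notes on version B (the rewrite author's own statement) =====
-- stated objective: alternative
-- what changed: Replaces the minzero counter state machine with a filter down to the '0'/'1' entries followed by a stateless sliding-window match (zip of the list with its shifts) for a '0' not preceded by '0' and followed by '1'.
import Mathlib
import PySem

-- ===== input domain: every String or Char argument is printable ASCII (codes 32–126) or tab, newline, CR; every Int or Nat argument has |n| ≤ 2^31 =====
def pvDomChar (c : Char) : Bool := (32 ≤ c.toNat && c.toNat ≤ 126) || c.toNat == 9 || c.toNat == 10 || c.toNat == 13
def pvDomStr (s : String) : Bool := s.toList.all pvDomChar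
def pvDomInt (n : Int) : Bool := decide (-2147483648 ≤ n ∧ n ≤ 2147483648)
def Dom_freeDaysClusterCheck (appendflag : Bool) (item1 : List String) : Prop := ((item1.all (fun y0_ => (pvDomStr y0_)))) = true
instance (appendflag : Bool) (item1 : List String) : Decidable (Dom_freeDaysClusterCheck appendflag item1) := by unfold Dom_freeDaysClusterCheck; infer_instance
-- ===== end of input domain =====

-- B replaces A's minzero state machine by a filter to the "0"/"1" entries plus a stateless
-- sliding-window match for a lone "0" followed by "1" (objective: alternative, same cost).

-- ===== PORT A =====
def freeDaysClusterCheck (appendflag : Bool) (item1 : List String) : Bool :=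
  let n : Int := item1.length
  -- the two index-append loops; item1[m] is pyGetD (in range for every input Pre_ admits)
  let item2 := (PySem.List.pyRange (n - 7) n 1).foldl
      (fun acc m => acc ++ [PySem.List.pyGetD item1 m ""]) []
  let item2 := (PySem.List.pyRange 0 n 1).foldl
      (fun acc m => acc ++ [PySem.List.pyGetD item1 m ""]) item2
  let st := item2.foldl (fun (s : Int × Bool) item =>
      if item == "0" then
        (if s.1 == 0 then ((1 : Int), s.2) else (s.1 + 1, s.2))
      else if item == "1" then
        (if s.1 == 1 then (s.1, false) else ((0 : Int), s.2))
      else s) ((0 : Int), appendflag)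
  st.2

-- ===== PORT B =====
def freeDaysClusterCheck_alt (appendflag : Bool) (item1 : List String) : Bool :=
  let n : Int := item1.length
  let days := (PySem.List.pyRange (n - 7) n 1).map (fun m => PySem.List.pyGetD item1 m "")
           ++ (PySem.List.pyRange 0 n 1).map (fun m => PySem.List.pyGetD item1 m "")
  let bits := days.filter (fun d => d == "0" || d == "1")
  -- zip(["x"]+bits, bits, bits[1:])
  let bad := (List.zip ("x" :: bits) (List.zip bits (bits.drop 1))).any
      (fun t => (t.1 != "0") && (t.2.1 == "0") && (t.2.2 == "1"))
  if bad then false else appendflag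

-- ===== PRECONDITION & SPEC =====
-- Pre_ excludes exactly the inputs where A raises IndexError: for len(item1) < 4 the first
-- wrap loop reads item1[len-7], an index below -len (for len 0 any negative index raises).
def Pre_freeDaysClusterCheck (appendflag : Bool) (item1 : List String) : Prop :=
  4 ≤ item1.length
instance (appendflag : Bool) (item1 : List String) : Decidable (Pre_freeDaysClusterCheck appendflag item1) := by unfold Pre_freeDaysClusterCheck; infer_instance

def pvWitness_freeDaysClusterCheck : Bool × List String := (true, ["1", "0", "1", "1"])

def Spec_freeDaysClusterCheck (appendflag : Bool) (item1 : List String) (out : Bool) : Prop := out = freeDaysClusterCheck_alt appendflag item1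
instance (appendflag : Bool) (item1 : List String) (out : Bool) : Decidable (Spec_freeDaysClusterCheck appendflag item1 out) := by unfold Spec_freeDaysClusterCheck; infer_instance

-- ===== CLAIM (what is proved, stated in full; the proofs are below) =====
def Claim_equal_freeDaysClusterCheck : Prop := ∀ (appendflag : Bool) (item1 : List String), Dom_freeDaysClusterCheck appendflag item1 → Pre_freeDaysClusterCheck appendflag item1 → Spec_freeDaysClusterCheck appendflag item1 (freeDaysClusterCheck appendflag item1)

-- ===== LEMMAS AND PROOFS =====

-- A's state-machine step
def pvStep (s : Int × Bool) (item : String) : Int × Bool :=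
  if item == "0" then
    (if s.1 == 0 then ((1 : Int), s.2) else (s.1 + 1, s.2))
  else if item == "1" then
    (if s.1 == 1 then (s.1, false) else ((0 : Int), s.2))
  else s

-- "a zero-run of length exactly 1 (given mz pending zeros) is followed by a 1"
def pvBadFrom (mz : Int) : List String → Bool
  | [] => false
  | x :: xs =>
      if x == "0" then pvBadFrom (mz + 1) xs
      else if x == "1" then (if mz == 1 then true else pvBadFrom 0 xs)
      else pvBadFrom mz xs

-- recursive form of B's window scan, prev element as state
def pvZr (a : String) : List String → Bool
  | b :: c :: r => ((a != "0") && (b == "0") && (c == "1")) || pvZr b (c :: r)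
  | _ => false

theorem pvMachine (L : List String) : ∀ (mz : Int) (flag : Bool),
    (L.foldl pvStep (mz, flag)).2 = (flag && !(pvBadFrom mz L)) := by
  induction L with
  | nil => intro mz flag; simp [pvBadFrom]
  | cons x xs ih =>
    intro mz flag
    simp only [List.foldl_cons, pvStep, pvBadFrom]
    by_cases h0 : x == "0"
    · simp only [h0, if_true]
      by_cases hz : mz == 0
      · have hz' : mz = 0 := by simpa using hz
        subst hz'
        simp [ih]
      · simp [hz, ih]
    · by_cases h1 : x == "1"
      · simp only [h0, h1, if_false, if_true]
        by_cases hm : mz == 1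
        · simp [hm, ih]
        · simp [hm, ih]
      · simp [h0, h1, ih]

theorem pvBadFrom_filter (L : List String) : ∀ (mz : Int),
    pvBadFrom mz (L.filter (fun d => d == "0" || d == "1")) = pvBadFrom mz L := by
  induction L with
  | nil => intro mz; rfl
  | cons x xs ih =>
    intro mz
    by_cases h0 : x == "0"
    · simp [List.filter_cons, h0, pvBadFrom, ih]
    · by_cases h1 : x == "1"
      · by_cases hm : mz == 1 <;> simp [List.filter_cons, h0, h1, hm, pvBadFrom, ih]
      · simp [List.filter_cons, h0, h1, pvBadFrom, ih]

theorem pvZip_eq_zr (bits : List String) : ∀ (a : String),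
    ((List.zip (a :: bits) (List.zip bits (bits.drop 1))).any
      (fun t => (t.1 != "0") && (t.2.1 == "0") && (t.2.2 == "1"))) = pvZr a bits := by
  induction bits with
  | nil => intro a; rfl
  | cons b rest ih =>
    intro a
    cases rest with
    | nil => rfl
    | cons c r =>
      have h := ih b
      simp only [List.drop_succ_cons, List.drop_zero, List.drop_one] at h ⊢
      simp only [List.zip_cons_cons, List.any_cons, pvZr] at h ⊢
      rw [h]

theorem pvBadFrom_eq_zr (f : List String) : ∀ (mz : Int) (a : String),
    (∀ x ∈ f, x = "0" ∨ x = "1") → 0 ≤ mz → ((a = "0") ↔ (1 ≤ mz)) →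
    pvBadFrom mz f = (((mz == 1) && (f.head? == some "1")) || pvZr a f) := by
  induction f with
  | nil => intro mz a _ _ _; simp [pvBadFrom, pvZr]
  | cons x xs ih =>
    intro mz a hbin hnn hiff
    have hx := hbin x (List.mem_cons_self)
    have hbin' : ∀ y ∈ xs, y = "0" ∨ y = "1" := fun y hy => hbin y (List.mem_cons_of_mem _ hy)
    rcases hx with hx | hx
    · subst hx
      have hkey : ((mz + 1 : Int) == 1) = (a != "0") := by
        by_cases h : a = "0"
        · have := hiff.mp h
          simp [h]; omega
        · have h2 : mz = 0 := by
            have : ¬ (1 ≤ mz) := fun hc => h (hiff.mpr hc)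
            omega
          simp [h, h2]
      cases xs with
      | nil => simp [pvBadFrom, pvZr]
      | cons c r =>
        have hrec := ih (mz + 1) "0" hbin' (by omega) ⟨fun _ => by omega, fun _ => rfl⟩
        have hL : pvBadFrom mz ("0" :: c :: r) = pvBadFrom (mz + 1) (c :: r) := by
          simp [pvBadFrom]
        rw [hL, hrec, hkey]
        simp [pvZr, Bool.and_assoc]
    · subst hx
      have hL : pvBadFrom mz ("1" :: xs)
          = (if mz == 1 then true else pvBadFrom 0 xs) := by
        simp [pvBadFrom]
      rw [hL]
      by_cases hm : (mz == 1) = true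
      · simp [hm]
      · simp only [Bool.not_eq_true] at hm
        cases xs with
        | nil => simp [pvBadFrom, pvZr, hm]
        | cons c r =>
          have hrec := ih 0 "1" hbin' (by omega) ⟨fun h => by simp_all, fun h => by omega⟩
          rw [hrec]
          simp [pvZr, hm]

-- ===== VERDICT (by name: the statement is the Claim_ definition above) =====
theorem freeDaysClusterCheck_spec : Claim_equal_freeDaysClusterCheck := by
  intro appendflag item1 _ _
  unfold Spec_freeDaysClusterCheck freeDaysClusterCheck freeDaysClusterCheck_alt
  simp only [PySem.List.foldl_append_singleton_eq_map, List.nil_append]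
  set days := (PySem.List.pyRange ((item1.length : Int) - 7) (item1.length) 1).map
        (fun m => PySem.List.pyGetD item1 m "")
      ++ (PySem.List.pyRange 0 (item1.length) 1).map
        (fun m => PySem.List.pyGetD item1 m "") with hdays
  set bits := days.filter (fun d => d == "0" || d == "1") with hbits
  have h1 : (days.foldl pvStep ((0 : Int), appendflag)).2
      = (appendflag && !(pvBadFrom 0 days)) := pvMachine days 0 appendflag
  have hbin : ∀ x ∈ bits, x = "0" ∨ x = "1" := by
    intro x hx
    rw [hbits, List.mem_filter] at hx
    rcases hx with ⟨_, h⟩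
    simp at h
    tauto
  have h2 : pvBadFrom 0 bits = pvZr "x" bits := by
    rw [pvBadFrom_eq_zr bits 0 "x" hbin (by omega) (by constructor <;> intro h <;> simp_all)]
    simp
  have h3 := pvZip_eq_zr bits "x"
  show (days.foldl pvStep ((0 : Int), appendflag)).2 = _
  rw [h1, ← pvBadFrom_filter days 0, ← hbits, h2, ← h3]
  cases h : (List.zip ("x" :: bits) (List.zip bits (bits.drop 1))).any
      (fun t => (t.1 != "0") && (t.2.1 == "0") && (t.2.2 == "1")) <;> simp
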